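-- pv_equiv track=rewrite | github.com/Slogulai/CS410p_DataEng | DataValidation/emp_validate.py | count_city_violations
-- ===== SOURCE A (Python) =====
-- def count_city_violations(rows):
--     city_employee_count = {}
--     for row in rows:
--         city = row.get('city', '').strip()
--         if city:
--             city_employee_count[city] = city_employee_count.get(city, 0) + 1
--
--     violation_count = 0
--     for city, count in city_employee_count.items():
--         if count > 1:
--             violation_count += 1
--
--     return violation_count
-- ===== SOURCE B (Python) =====
-- def count_city_violations(rows):
--     cities = sorted(c for c in (row.get('city', '').strip() for row in rows) if c)
--     total = 0
--     while cities:
--         c = cities[0]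
--         k = 1
--         while k < len(cities) and cities[k] == c:
--             k += 1
--         if k > 1:
--             total += 1
--         cities = cities[k:]
--     return total
-- ===== Notes on version B (the rewrite author's own statement) =====
-- stated objective: alternative
-- what changed: Replaces the per-city count dictionary plus a second pass over its items with sort-then-scan: sort the nonempty stripped cities and count maximal runs of equal adjacent elements of length > 1.
import Mathlib
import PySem

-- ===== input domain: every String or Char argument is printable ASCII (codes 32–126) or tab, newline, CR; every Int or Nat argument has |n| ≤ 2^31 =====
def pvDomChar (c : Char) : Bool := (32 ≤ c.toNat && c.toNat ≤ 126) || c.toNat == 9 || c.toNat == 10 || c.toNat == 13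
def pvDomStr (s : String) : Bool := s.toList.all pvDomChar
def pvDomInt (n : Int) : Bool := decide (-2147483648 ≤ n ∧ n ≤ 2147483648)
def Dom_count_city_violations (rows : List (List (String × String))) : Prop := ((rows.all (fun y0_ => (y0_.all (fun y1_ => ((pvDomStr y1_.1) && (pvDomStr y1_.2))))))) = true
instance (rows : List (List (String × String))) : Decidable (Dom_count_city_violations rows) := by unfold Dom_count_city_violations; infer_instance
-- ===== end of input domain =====

-- B replaces A's per-city count dictionary plus second pass over its items with sort-then-scan: sort the nonempty stripped cities and count the maximal runs of equal adjacent elements longer than 1; objective: alternative.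

-- ===== PORT A =====
def count_city_violations (rows : List (List (String × String))) : Int :=
  let cec := rows.foldl (fun (d : PySem.Dict String Int) row =>
      let city := PySem.Str.strip ((PySem.Dict.mk row).getD "city" "")
      if city ≠ "" then d.insert city (d.getD city 0 + 1) else d)
    PySem.Dict.empty
  cec.items.foldl (fun acc p => if p.2 > 1 then acc + 1 else acc) (0 : Int)

-- ===== PORT B =====
-- the 'while cities:' loop of Source B: split off the run of the head element, +1 if it is longer than 1
def pvScanRuns : List String → Int
  | [] => 0
  | c :: rest =>
      (if (rest.takeWhile (fun x => x == c)).length + 1 > 1 then 1 else 0)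
        + pvScanRuns (rest.dropWhile (fun x => x == c))
termination_by cs => cs.length
decreasing_by
  simp only [List.length_cons]
  exact Nat.lt_succ_of_le (List.length_dropWhile_le _ _)

def count_city_violations_alt (rows : List (List (String × String))) : Int :=
  let cities := PySem.List.sorted
    ((rows.map (fun row => PySem.Str.strip ((PySem.Dict.mk row).getD "city" ""))).filter
      (fun c => c ≠ ""))
    (fun x => x) false
  pvScanRuns cities

-- ===== PRECONDITION & SPEC =====
def Spec_count_city_violations (rows : List (List (String × String))) (out : Int) : Prop := out = count_city_violations_alt rows
instance (rows : List (List (String × String))) (out : Int) : Decidable (Spec_count_city_violations rows out) := by unfold Spec_count_city_violations; infer_instance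

-- ===== CLAIM (what is proved, stated in full; the proofs are below) =====
def Claim_equal_count_city_violations : Prop := ∀ (rows : List (List (String × String))), Dom_count_city_violations rows → Spec_count_city_violations rows (count_city_violations rows)

-- ===== LEMMAS AND PROOFS =====

-- the stripped 'city' field of one row
def pvCity (row : List (String × String)) : String :=
  PySem.Str.strip ((PySem.Dict.mk row).getD "city" "")

-- the nonempty stripped cities, in row order
def pvCities (rows : List (List (String × String))) : List String :=
  (rows.map pvCity).filter (fun c => c ≠ "")

theorem a_eq_countP (rows : List (List (String × String))) :
    count_city_violations rows
      = ((PySem.Set.ofList (pvCities rows)).countP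
          (fun k => decide (((pvCities rows).count k : Int) > 1)) : Int) := by
  show (rows.foldl (fun (d : PySem.Dict String Int) row =>
      if pvCity row ≠ "" then d.insert (pvCity row) (d.getD (pvCity row) 0 + 1) else d)
      PySem.Dict.empty).items.foldl (fun acc p => if p.2 > 1 then acc + 1 else acc) (0 : Int) = _
  rw [← List.foldl_map (f := pvCity) (g := fun (d : PySem.Dict String Int) city =>
      if city ≠ "" then d.insert city (d.getD city 0 + 1) else d)]
  rw [PySem.List.foldl_ite_eq_foldl_filter (p := fun c => c ≠ "")
      (f := fun (d : PySem.Dict String Int) city => d.insert city (d.getD city 0 + 1))]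
  rw [show ((rows.map pvCity).filter fun c => decide ¬c = "") = pvCities rows from rfl]
  rw [PySem.Dict.foldl_insert_getD_add_one_eq_counter]
  rw [PySem.List.foldl_ite_add_one]
  rw [PySem.Dict.items_counter]
  rw [List.countP_map]
  rw [zero_add, Int.natCast_inj]
  apply List.countP_congr
  intro k _
  simp only [Function.comp_apply]

-- in a sorted list whose elements are all ≥ c, dropping the leading run of c removes every c
theorem not_mem_dropWhile_of_sorted (c : String) :
    ∀ (l : List String), l.Pairwise (· ≤ ·) → (∀ x ∈ l, c ≤ x) →
      c ∉ l.dropWhile (fun x => x == c)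
  | [], _, _ => by simp
  | a :: t, h, hle => by
    by_cases ha : a = c
    · subst ha
      rw [List.dropWhile_cons_of_pos (by simp)]
      exact not_mem_dropWhile_of_sorted a t (h.sublist (List.sublist_cons_self a t))
        (fun x hx => hle x (List.mem_cons_of_mem a hx))
    · rw [List.dropWhile_cons_of_neg (by simp [ha])]
      intro hc
      rcases List.mem_cons.mp hc with h1 | h2
      · exact ha h1.symm
      · have hac : a ≤ c := (List.pairwise_cons.mp h).1 c h2
        have hca : c ≤ a := hle a (List.mem_cons_self)
        exact ha (le_antisymm hac hca)

-- the run-scan on a sorted list counts exactly the distinct elements occurring more than once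
theorem scanRuns_eq : ∀ (cs : List String), cs.Pairwise (· ≤ ·) →
    pvScanRuns cs
      = ((PySem.Set.ofList cs).countP (fun k => decide ((cs.count k : Int) > 1)) : Int)
  | [], _ => by simp [pvScanRuns, PySem.Set.ofList]
  | c :: rest, h => by
    have h1 : ∀ x ∈ rest, c ≤ x := (List.pairwise_cons.mp h).1
    have h2 : rest.Pairwise (· ≤ ·) := (List.pairwise_cons.mp h).2
    set run := rest.takeWhile (fun x => x == c) with hrun
    set rest' := rest.dropWhile (fun x => x == c) with hrest'
    have hsplit : run ++ rest' = rest := List.takeWhile_append_dropWhile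
    have hruneq : ∀ x ∈ run, x = c := by
      intro x hx
      have := List.mem_takeWhile_imp hx
      simpa using this
    have hnotmem : c ∉ rest' := not_mem_dropWhile_of_sorted c rest h2 h1
    have hrest'sub : rest'.Sublist rest := List.dropWhile_sublist _
    have hrest'pw : rest'.Pairwise (· ≤ ·) := h2.sublist hrest'sub
    have ih := scanRuns_eq rest' hrest'pw
    -- counts
    have hcountc : (c :: rest).count c = run.length + 1 := by
      rw [List.count_cons_self, ← hsplit, List.count_append]
      rw [List.count_eq_length.mpr (fun b hb => (hruneq b hb).symm)]
      rw [List.count_eq_zero.mpr hnotmem]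
    have hcountne : ∀ k, k ≠ c → (c :: rest).count k = rest'.count k := by
      intro k hk
      rw [← hsplit]
      have h0 : List.count k run = 0 := List.count_eq_zero.mpr (fun hm => hk (hruneq k hm))
      simp [List.count_append, h0, Ne.symm hk]
    -- the filtered distinct lists are permutations
    have hperm :
        ((PySem.Set.ofList (c :: rest)).filter
            (fun k => decide (((c :: rest).count k : Int) > 1))).Perm
          ((if run ≠ [] then [c] else []) ++
            (PySem.Set.ofList rest').filter (fun k => decide ((rest'.count k : Int) > 1))) := by
      have hnodupL : ((PySem.Set.ofList (c :: rest)).filter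
          (fun k => decide (((c :: rest).count k : Int) > 1))).Nodup :=
        (PySem.Set.nodup_ofList _).filter _
      have hcR : c ∉ (PySem.Set.ofList rest').filter
          (fun k => decide ((rest'.count k : Int) > 1)) := by
        intro hc
        exact hnotmem ((PySem.Set.mem_ofList _ _).mp (List.mem_of_mem_filter hc))
      have hnodupR : ((if run ≠ [] then [c] else []) ++
          (PySem.Set.ofList rest').filter (fun k => decide ((rest'.count k : Int) > 1))).Nodup := by
        by_cases hr : run = []
        · simpa [hr] using (PySem.Set.nodup_ofList rest').filter _
        · rw [if_pos hr, List.singleton_append]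
          exact List.nodup_cons.mpr ⟨hcR, (PySem.Set.nodup_ofList rest').filter _⟩
      rw [List.perm_ext_iff_of_nodup hnodupL hnodupR]
      intro x
      rw [List.mem_filter, List.mem_append, List.mem_filter,
        PySem.Set.mem_ofList, PySem.Set.mem_ofList]
      by_cases hx : x = c
      · subst hx
        simp only [hnotmem]
        constructor
        · rintro ⟨-, hcnt⟩
          have : 1 < ((x :: rest).count x : Int) := by simpa using hcnt
          rw [hcountc] at this
          have : run ≠ [] := by
            intro hr; rw [hr] at this; simp at this
          simp [this]
        · intro hm
          by_cases hr : run = []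
          · simp [hr] at hm
          · refine ⟨List.mem_cons_self, ?_⟩
            have : (1 : Int) < ((x :: rest).count x : Int) := by
              rw [hcountc]
              have : 1 ≤ run.length := List.length_pos_iff.mpr hr
              push_cast; omega
            simpa using this
      · have hxm : x ∈ (if run ≠ [] then [c] else []) ↔ False := by
          by_cases hr : run = [] <;> simp [hr, hx]
        have hmr : x ∈ rest ↔ x ∈ rest' := by
          rw [← hsplit, List.mem_append]
          constructor
          · rintro (hm | hm)
            · exact absurd (hruneq x hm) hx
            · exact hm
          · exact Or.inr
        rw [hcountne x hx]
        simp [List.mem_cons, hx, hmr]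
    -- assemble
    rw [pvScanRuns, ← hrun, ← hrest']
    rw [ih, List.countP_eq_length_filter, List.countP_eq_length_filter, hperm.length_eq,
      List.length_append]
    by_cases hr : run = []
    · simp [hr]
    · have : 1 ≤ run.length := List.length_pos_iff.mpr hr
      simp only [if_pos (by exact hr)]
      rw [if_pos (by omega)]
      push_cast
      simp
termination_by cs => cs.length
decreasing_by
  simp only [List.length_cons]
  exact Nat.lt_succ_of_le (List.length_dropWhile_le _ _)

-- the distinct-elements-with-count>1 tally is invariant under permutation of the multiset
theorem countP_ofList_perm (cs ds : List String) (hp : cs.Perm ds) :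
    (PySem.Set.ofList cs).countP (fun k => decide ((cs.count k : Int) > 1))
      = (PySem.Set.ofList ds).countP (fun k => decide ((ds.count k : Int) > 1)) := by
  rw [List.countP_eq_length_filter, List.countP_eq_length_filter]
  apply List.Perm.length_eq
  rw [List.perm_ext_iff_of_nodup ((PySem.Set.nodup_ofList _).filter _)
      ((PySem.Set.nodup_ofList _).filter _)]
  intro x
  rw [List.mem_filter, List.mem_filter, PySem.Set.mem_ofList, PySem.Set.mem_ofList,
    hp.mem_iff, hp.count_eq]

-- ===== VERDICT (by name: the statement is the Claim_ definition above) =====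
theorem count_city_violations_spec : Claim_equal_count_city_violations := by
  intro rows _
  unfold Spec_count_city_violations
  rw [a_eq_countP]
  show _ = pvScanRuns (PySem.List.sorted (pvCities rows) (fun x => x) false)
  rw [scanRuns_eq _ (by simpa using PySem.List.sorted_pairwise (pvCities rows) (fun x => x))]
  rw [countP_ofList_perm _ _ (PySem.List.sorted_perm (pvCities rows) (fun x => x) false)]
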